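-- pv_equiv track=rewrite | github.com/crisubianca/PY2022 | Lab2/lab2_ex4.py | music
-- ===== SOURCE A (Python) =====
-- def music(musical_notes, list_of_moves, start_position):
--
--     new_list = [musical_notes[start_position]]
--
--     for move in list_of_moves:
--         if move < 0:
--             start_position -= (move + 1)
--             start_position = start_position % len(musical_notes)
--         else:
--             start_position = start_position + move
--             start_position = start_position % len(musical_notes)
--         new_list.append(musical_notes[start_position])
--     return new_list
-- ===== SOURCE B (Python) =====
-- def music(musical_notes, list_of_moves, start_position):
--     # keep the cycle itself rotated so the current note is always at the front
--     out = [musical_notes[start_position]]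
--     n = len(musical_notes)
--     rot = musical_notes[start_position % n:] + musical_notes[:start_position % n]
--     for move in list_of_moves:
--         k = (move if move >= 0 else -move - 1) % n
--         rot = rot[k:] + rot[:k]
--         out.append(rot[0])
--     return out
-- ===== Notes on version B (the rewrite author's own statement) =====
-- stated objective: alternative
-- what changed: Replaces A's running-index walk (one integer position updated and modded each step) with a rotated-list walk: B keeps the note cycle itself rotated so the current note is always at the front, reading element 0 after each rotation instead of maintaining any position index; this trades O(1) steps for O(n) rotations.
import Mathlib
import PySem

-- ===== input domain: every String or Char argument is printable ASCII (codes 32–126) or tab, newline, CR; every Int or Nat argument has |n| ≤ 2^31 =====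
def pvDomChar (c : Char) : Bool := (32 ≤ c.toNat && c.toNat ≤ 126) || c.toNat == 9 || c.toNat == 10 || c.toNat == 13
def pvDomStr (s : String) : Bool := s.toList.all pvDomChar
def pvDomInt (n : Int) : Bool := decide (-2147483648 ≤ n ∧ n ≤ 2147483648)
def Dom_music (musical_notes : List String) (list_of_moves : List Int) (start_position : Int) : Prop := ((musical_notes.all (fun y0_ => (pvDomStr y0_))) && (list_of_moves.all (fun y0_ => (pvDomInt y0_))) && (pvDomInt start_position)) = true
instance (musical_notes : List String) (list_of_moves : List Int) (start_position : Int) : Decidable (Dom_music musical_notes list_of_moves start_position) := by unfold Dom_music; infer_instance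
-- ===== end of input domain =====

-- B replaces A's running-index loop by a rotated-list walk: it keeps the note cycle itself rotated so the current note is always at the front (objective: alternative data structure; it trades the O(1)-per-step index for an O(n)-per-step rotation).


-- ===== PORT A =====
-- loop body of A: compute the new (modded) position, append the note there
def musicStep (musical_notes : List String) (st : Int × List String) (move : Int) : Int × List String :=
  let p := if move < 0 then PySem.Int.mod (st.1 - (move + 1)) (musical_notes.length : Int)
           else PySem.Int.mod (st.1 + move) (musical_notes.length : Int)
  (p, st.2 ++ [(PySem.List.pyGet? musical_notes p).getD ""])

def music (musical_notes : List String) (list_of_moves : List Int) (start_position : Int) : List String :=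
  (list_of_moves.foldl (musicStep musical_notes)
    (start_position, [(PySem.List.pyGet? musical_notes start_position).getD ""])).2

-- ===== PORT B =====
-- loop body of B: rotate the cycle left by the move's step count, read the front note
def musicRotStep (N : Int) (st : List String × List String) (move : Int) : List String × List String :=
  let k := PySem.Int.mod (if move ≥ 0 then move else -move - 1) N
  let rot := PySem.List.slice st.1 (some k) none ++ PySem.List.slice st.1 none (some k)
  (rot, st.2 ++ [(PySem.List.pyGet? rot 0).getD ""])

def music_alt (musical_notes : List String) (list_of_moves : List Int) (start_position : Int) : List String :=
  let N := (musical_notes.length : Int)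
  let s := PySem.Int.mod start_position N
  let rot0 := PySem.List.slice musical_notes (some s) none ++ PySem.List.slice musical_notes none (some s)
  (list_of_moves.foldl (musicRotStep N)
    (rot0, [(PySem.List.pyGet? musical_notes start_position).getD ""])).2

-- ===== PRECONDITION & SPEC =====
-- A raises IndexError unless start_position is a valid (possibly negative) index; this also forces a nonempty list (no ZeroDivisionError).
def Pre_music (musical_notes : List String) (list_of_moves : List Int) (start_position : Int) : Prop :=
  PySem.Raise.InRange musical_notes.length start_position
instance (musical_notes : List String) (list_of_moves : List Int) (start_position : Int) : Decidable (Pre_music musical_notes list_of_moves start_position) := by unfold Pre_music; infer_instance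
def pvWitness_music : List String × List Int × Int := (["do", "re", "mi"], [2, -3, 1], -1)

def Spec_music (musical_notes : List String) (list_of_moves : List Int) (start_position : Int) (out : List String) : Prop := out = music_alt musical_notes list_of_moves start_position
instance (musical_notes : List String) (list_of_moves : List Int) (start_position : Int) (out : List String) : Decidable (Spec_music musical_notes list_of_moves start_position out) := by unfold Spec_music; infer_instance

-- ===== CLAIM (what is proved, stated in full; the proofs are below) =====
def Claim_equal_music : Prop := ∀ (musical_notes : List String) (list_of_moves : List Int) (start_position : Int), Dom_music musical_notes list_of_moves start_position → Pre_music musical_notes list_of_moves start_position → Spec_music musical_notes list_of_moves start_position (music musical_notes list_of_moves start_position)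

-- ===== LEMMAS AND PROOFS =====

-- B's Python two-slice rotation IS List.rotate when 0 ≤ k ≤ length
lemma slice_rot {l : List String} {k : Int} (h0 : 0 ≤ k) (hk : k.toNat ≤ l.length) :
    PySem.List.slice l (some k) none ++ PySem.List.slice l none (some k) = l.rotate k.toNat := by
  rw [PySem.List.slice_from l h0, PySem.List.slice_to l h0, List.rotate_eq_drop_append_take hk]

-- main invariant: the A-side running position and the B-side rotation amount agree mod n,
-- hence the two folds append the same notes
lemma main_inv (notes : List String) (hne : notes ≠ []) (moves : List Int) :
    ∀ (a : Int) (m : Nat) (acc : List String),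
    (m : Int) % (notes.length : Int) = PySem.Int.mod a (notes.length : Int) →
    (moves.foldl (musicStep notes) (a, acc)).2
      = (moves.foldl (musicRotStep (notes.length : Int)) (notes.rotate m, acc)).2 := by
  have hlen : 0 < notes.length := List.length_pos_iff.mpr hne
  have hN : 0 < ((notes.length : Int)) := by exact_mod_cast hlen
  induction moves with
  | nil => intro a m acc _; rfl
  | cons mv t ih =>
    intro a m acc h
    -- unified step amount δ
    set N := ((notes.length : Int)) with hNdef
    have hδ : (if mv ≥ 0 then mv else -mv - 1) = (if mv < 0 then -mv - 1 else mv) := by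
      split_ifs with h1 h2 <;> omega
    set δ : Int := if mv < 0 then -mv - 1 else mv with hδdef
    set k : Int := PySem.Int.mod δ N with hk
    have hk0 : 0 ≤ k := PySem.Int.mod_nonneg δ hN
    have hkN : k < N := PySem.Int.mod_lt δ hN
    -- A's new position
    set a' : Int := PySem.Int.mod (a + δ) N with ha'
    have hstepA : (if mv < 0 then PySem.Int.mod (a - (mv + 1)) N else PySem.Int.mod (a + mv) N) = a' := by
      rw [ha', hδdef]; split_ifs with h1
      · congr 1; ring
      · rfl
    have ha'0 : 0 ≤ a' := PySem.Int.mod_nonneg _ hN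
    have ha'N : a' < N := PySem.Int.mod_lt _ hN
    -- B's new rotation
    have hrotlen : (notes.rotate m).length = notes.length := List.length_rotate notes m
    have hrot : PySem.List.slice (notes.rotate m) (some k) none ++ PySem.List.slice (notes.rotate m) none (some k)
        = notes.rotate (m + k.toNat) := by
      rw [slice_rot hk0 (by rw [hrotlen]; omega), List.rotate_rotate]
    -- new invariant
    have hmod : ∀ x : Int, PySem.Int.mod x N = x % N := fun x => PySem.Int.mod_eq_emod_of_pos hN
    have hA : (m : Int) % N = a % N := by rw [h, hmod]
    have e3 : k % N = δ % N := by rw [hk, hmod]; exact Int.emod_emod_of_dvd _ dvd_rfl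
    have hinv' : ((m + k.toNat : Nat) : Int) % N = PySem.Int.mod a' N := by
      have hkc : ((k.toNat : Int)) = k := Int.toNat_of_nonneg hk0
      have e1 : ((m + k.toNat : Nat) : Int) = (m : Int) + k := by push_cast [hkc]; ring
      have e2 : PySem.Int.mod a' N = a' := by rw [hmod]; exact Int.emod_eq_of_lt ha'0 ha'N
      rw [e1, e2, ha', hmod]
      calc ((m : Int) + k) % N = ((m : Int) % N + k % N) % N := Int.add_emod _ _ _
        _ = (a % N + δ % N) % N := by rw [hA, e3]
        _ = (a + δ) % N := (Int.add_emod _ _ _).symm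
    -- appended elements agree
    have hidx : (m + k.toNat) % notes.length = a'.toNat := by
      have h1 : (((m + k.toNat) % notes.length : Nat) : Int) = ((m + k.toNat : Nat) : Int) % N := by
        rw [hNdef]; exact_mod_cast Int.natCast_mod _ _
      have h2 : ((m + k.toNat : Nat) : Int) % N = a' := by
        rw [hinv', hmod]; exact Int.emod_eq_of_lt ha'0 ha'N
      have h3 : ((a'.toNat : Int)) = a' := Int.toNat_of_nonneg ha'0
      omega
    have helem : PySem.List.pyGet? notes a' = PySem.List.pyGet? (notes.rotate (m + k.toNat)) 0 := by
      have g1 : PySem.List.pyGet? notes a' = notes[a'.toNat]? := by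
        conv_lhs => rw [show a' = ((a'.toNat : Nat) : Int) from (Int.toNat_of_nonneg ha'0).symm]
        rw [PySem.List.pyGet?_natCast]
      have g2 : PySem.List.pyGet? (notes.rotate (m + k.toNat)) 0
          = notes[(0 + (m + k.toNat)) % notes.length]? := by
        rw [show (0 : Int) = ((0 : Nat) : Int) from rfl, PySem.List.pyGet?_natCast,
            List.getElem?_rotate hlen]
      rw [g1, g2, Nat.zero_add, hidx]
    -- assemble the step
    simp only [List.foldl_cons, musicStep, musicRotStep, hδ]
    rw [← hNdef, hstepA, ← hk, hrot, helem]
    exact ih a' (m + k.toNat) _ hinv'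

-- ===== VERDICT (by name: the statement is the Claim_ definition above) =====
theorem music_spec : Claim_equal_music := by
  intro notes moves sp _ hpre
  have hne : notes ≠ [] := by
    unfold Pre_music PySem.Raise.InRange at hpre
    intro h; subst h; simp at hpre; omega
  have hlen : 0 < notes.length := List.length_pos_iff.mpr hne
  have hN : 0 < ((notes.length : Int)) := by exact_mod_cast hlen
  unfold Spec_music music music_alt
  dsimp only
  have h0 : 0 ≤ PySem.Int.mod sp (notes.length : Int) := PySem.Int.mod_nonneg _ hN
  have hlt : PySem.Int.mod sp (notes.length : Int) < (notes.length : Int) := PySem.Int.mod_lt _ hN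
  rw [slice_rot h0 (by omega)]
  exact main_inv notes hne moves sp _ _ (by
    rw [Int.toNat_of_nonneg h0, PySem.Int.mod_eq_emod_of_pos hN]
    exact Int.emod_emod_of_dvd _ dvd_rfl)
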